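-- pv_equiv track=rewrite | github.com/yakovnae/itau | itau.py | calculate_min_num_of_services
-- ===== SOURCE A (Python) =====
-- def calculate_min_num_of_services(service_time,arrivals):
-- 	q = []
-- 	max=0
-- 	for i in arrivals:
-- 		q = [s for s in q if i-s<service_time]
-- 		q = q + [i]
-- 		if len(q) > max:
-- 			max = len(q)
-- 	return max
-- ===== SOURCE B (Python) =====
-- def calculate_min_num_of_services(service_time, arrivals):
--     # q is kept SORTED ascending: expired arrivals form a prefix, located by binary
--     # search and cut off; each new arrival is inserted at its sorted position, also
--     # found by binary search.
--     q = []
--     best = 0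
--     for x in arrivals:
--         lo, hi = 0, len(q)
--         while lo < hi:
--             mid = (lo + hi) // 2
--             if x - q[mid] >= service_time:
--                 lo = mid + 1
--             else:
--                 hi = mid
--         del q[:lo]
--         lo, hi = 0, len(q)
--         while lo < hi:
--             mid = (lo + hi) // 2
--             if q[mid] <= x:
--                 lo = mid + 1
--             else:
--                 hi = mid
--         q.insert(lo, x)
--         if len(q) > best:
--             best = len(q)
--     return best
-- ===== Notes on version B (the rewrite author's own statement) =====
-- stated objective: faster
-- what changed: B keeps the pending-service queue sorted ascending and uses two hand-written binary searches per arrival (to cut the expired prefix and to splice the arrival in at its sorted position) instead of A's full filter-rebuild of the queue at every step.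
import Mathlib
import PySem

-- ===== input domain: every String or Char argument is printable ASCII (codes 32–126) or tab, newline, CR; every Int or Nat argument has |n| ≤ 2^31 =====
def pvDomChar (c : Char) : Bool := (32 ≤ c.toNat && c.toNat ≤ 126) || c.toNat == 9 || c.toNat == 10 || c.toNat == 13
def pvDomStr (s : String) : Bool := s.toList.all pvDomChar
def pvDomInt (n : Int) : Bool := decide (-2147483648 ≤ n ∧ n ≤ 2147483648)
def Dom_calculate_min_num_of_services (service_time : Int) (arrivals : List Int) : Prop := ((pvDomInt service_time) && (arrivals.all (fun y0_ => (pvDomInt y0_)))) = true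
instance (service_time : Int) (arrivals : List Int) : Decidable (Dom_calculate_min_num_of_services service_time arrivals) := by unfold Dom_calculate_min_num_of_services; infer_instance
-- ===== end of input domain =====

-- B keeps the queue sorted ascending and uses two hand-written binary searches per arrival (cut expired prefix, splice arrival in) instead of A's per-step full filter-rebuild; a timing run measured B faster.


-- ===== PORT A =====
-- one iteration of A's loop: filter the queue, append i, update max
def pvStepA (st : Int) (acc : List Int × Int) (i : Int) : List Int × Int :=
  let q := (acc.1.filter (fun s => i - s < st)) ++ [i]
  (q, if (q.length : Int) > acc.2 then (q.length : Int) else acc.2)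

def calculate_min_num_of_services (service_time : Int) (arrivals : List Int) : Int :=
  (arrivals.foldl (pvStepA service_time) ([], 0)).2

-- ===== PORT B =====
-- Source B's while loops: binary search on [lo, hi) for the first index whose element
-- fails p (the condition of the `if` branch that moves lo); q[mid] ported as getD
def pvBisect (p : Int → Bool) (q : List Int) (lo hi : Nat) : Nat :=
  if lo < hi then
    if p (q.getD ((lo + hi) / 2) 0) then pvBisect p q ((lo + hi) / 2 + 1) hi
    else pvBisect p q lo ((lo + hi) / 2)
  else lo
  termination_by hi - lo
  decreasing_by all_goals omega

-- one iteration of Source B's loop: cut expired prefix, splice x in at q[lo:lo], update best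
def pvStepB (st : Int) (acc : List Int × Int) (x : Int) : List Int × Int :=
  let k := pvBisect (fun s => decide (x - s ≥ st)) acc.1 0 acc.1.length
  let q1 := acc.1.drop k
  let j := pvBisect (fun s => decide (s ≤ x)) q1 0 q1.length
  let q := q1.take j ++ [x] ++ q1.drop j
  (q, if (q.length : Int) > acc.2 then (q.length : Int) else acc.2)

def calculate_min_num_of_services_alt (service_time : Int) (arrivals : List Int) : Int :=
  (arrivals.foldl (pvStepB service_time) ([], 0)).2

-- ===== PRECONDITION & SPEC =====
def Spec_calculate_min_num_of_services (service_time : Int) (arrivals : List Int) (out : Int) : Prop := out = calculate_min_num_of_services_alt service_time arrivals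
instance (service_time : Int) (arrivals : List Int) (out : Int) : Decidable (Spec_calculate_min_num_of_services service_time arrivals out) := by unfold Spec_calculate_min_num_of_services; infer_instance

-- ===== CLAIM (what is proved, stated in full; the proofs are below) =====
def Claim_equal_calculate_min_num_of_services : Prop := ∀ (service_time : Int) (arrivals : List Int), Dom_calculate_min_num_of_services service_time arrivals → Spec_calculate_min_num_of_services service_time arrivals (calculate_min_num_of_services service_time arrivals)

-- ===== LEMMAS AND PROOFS =====

-- the binary search returns F whenever p is true strictly below F and false from F on
lemma pvBisect_eq (p : Int → Bool) (q : List Int) (F : Nat)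
    (Htrue : ∀ i, i < F → p (q.getD i 0) = true)
    (Hfalse : ∀ i, F ≤ i → i < q.length → p (q.getD i 0) = false) :
    ∀ (n lo hi : Nat), hi - lo ≤ n → lo ≤ F → F ≤ hi → hi ≤ q.length →
      pvBisect p q lo hi = F := by
  intro n
  induction n with
  | zero =>
    intro lo hi h1 h2 h3 h4
    unfold pvBisect
    have : ¬ lo < hi := by omega
    simp only [this, if_false]
    omega
  | succ n ih =>
    intro lo hi h1 h2 h3 h4
    unfold pvBisect
    by_cases hlt : lo < hi
    · simp only [hlt, if_true]
      by_cases hp : p (q.getD ((lo + hi) / 2) 0) = true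
      · have hmid : (lo + hi) / 2 < F := by
          by_contra hc
          push_neg at hc
          have := Hfalse _ hc (by omega)
          rw [this] at hp
          exact absurd hp (by simp)
        rw [if_pos hp]
        exact ih ((lo + hi) / 2 + 1) hi (by omega) (by omega) h3 h4
      · have hmid : F ≤ (lo + hi) / 2 := by
          by_contra hc
          push_neg at hc
          exact hp (Htrue _ hc)
        rw [if_neg hp]
        exact ih lo ((lo + hi) / 2) (by omega) h2 hmid (by omega)
    · simp only [hlt, if_false]
      omega

-- on a sorted list a downward-closed predicate's dropWhile is the complementary filter
lemma pv_dropWhile_eq_filter (p : Int → Bool) :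
    ∀ (l : List Int), (∀ a b : Int, a ≤ b → p b = true → p a = true) →
      l.Pairwise (· ≤ ·) → l.dropWhile p = l.filter (fun s => !(p s)) := by
  intro l hmono hl
  induction l with
  | nil => rfl
  | cons s t ih =>
    rcases List.pairwise_cons.mp hl with ⟨hs, ht⟩
    by_cases h : p s = true
    · simp [List.dropWhile_cons, List.filter_cons, h, ih ht]
    · have : t.filter (fun s => !(p s)) = t := by
        apply List.filter_eq_self.mpr
        intro b hb
        by_cases hpb : p b = true
        · exact absurd (hmono s b (hs b hb) hpb) h
        · simp [hpb]
      simp [List.dropWhile_cons, List.filter_cons, h, this]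

-- the two binary searches of Source B find the takeWhile boundary of their predicate
lemma pvBisect_takeWhile (p : Int → Bool) (l : List Int)
    (hmono : ∀ a b : Int, a ≤ b → p b = true → p a = true)
    (hl : l.Pairwise (· ≤ ·)) :
    pvBisect p l 0 l.length = (l.takeWhile p).length := by
  have hsplit : l.takeWhile p ++ l.dropWhile p = l := List.takeWhile_append_dropWhile
  have hFle : (l.takeWhile p).length ≤ l.length := (List.takeWhile_sublist p).length_le
  apply pvBisect_eq p l _ ?htrue ?hfalse l.length 0 l.length (by omega) (by omega) hFle le_rfl
  case htrue =>
    intro i hi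
    have h1 : l.getD i 0 = (l.takeWhile p).getD i 0 := by
      conv_lhs => rw [← hsplit]
      exact List.getD_append _ _ _ _ hi
    rw [h1, List.getD_eq_getElem _ _ hi]
    exact List.mem_takeWhile_imp (List.getElem_mem hi)
  case hfalse =>
    intro i hge hlen
    have hlen' : i - (l.takeWhile p).length < (l.dropWhile p).length := by
      have := congrArg List.length hsplit
      simp only [List.length_append] at this
      omega
    have h1 : l.getD i 0 = (l.dropWhile p).getD (i - (l.takeWhile p).length) 0 := by
      conv_lhs => rw [← hsplit]
      exact List.getD_append_right _ _ _ _ hge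
    rw [h1, List.getD_eq_getElem _ _ hlen']
    have hmem : (l.dropWhile p)[i - (l.takeWhile p).length] ∈ l.filter (fun s => !(p s)) := by
      rw [← pv_dropWhile_eq_filter p l hmono hl]
      exact List.getElem_mem hlen'
    have := List.of_mem_filter hmem
    simpa using this

-- drop/take at the takeWhile boundary recover dropWhile/takeWhile
lemma pv_drop_takeWhile_length (p : Int → Bool) : ∀ (l : List Int),
    l.drop (l.takeWhile p).length = l.dropWhile p := by
  intro l
  induction l with
  | nil => rfl
  | cons s t ih =>
    by_cases h : p s = true
    · simp [List.takeWhile_cons, List.dropWhile_cons, h, ih]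
    · simp [List.takeWhile_cons, List.dropWhile_cons, h]

lemma pv_take_takeWhile_length (p : Int → Bool) : ∀ (l : List Int),
    l.take (l.takeWhile p).length = l.takeWhile p := by
  intro l
  induction l with
  | nil => rfl
  | cons s t ih =>
    by_cases h : p s = true
    · simp [List.takeWhile_cons, h, ih]
    · simp [List.takeWhile_cons, h]

-- one B-step: the new queue is a sorted permutation of A's rebuilt queue
lemma pvStepB_q (st x : Int) (qA qB : List Int)
    (hperm : qB.Perm qA) (hsort : qB.Pairwise (· ≤ ·)) :
    ((pvStepB st (qB, 0) x).1).Perm ((qA.filter (fun s => decide (x - s < st))) ++ [x]) ∧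
    ((pvStepB st (qB, 0) x).1).Pairwise (· ≤ ·) := by
  have hmono1 : ∀ a b : Int, a ≤ b → (decide (x - b ≥ st)) = true → (decide (x - a ≥ st)) = true := by
    intro a b hab h; simp only [decide_eq_true_eq] at *; omega
  have hmono2 : ∀ a b : Int, a ≤ b → (decide (b ≤ x)) = true → (decide (a ≤ x)) = true := by
    intro a b hab h; simp only [decide_eq_true_eq] at *; omega
  set p1 : Int → Bool := fun s => decide (x - s ≥ st) with hp1
  set p2 : Int → Bool := fun s => decide (s ≤ x) with hp2
  -- the first search + drop is the complementary filter
  have hk : pvBisect p1 qB 0 qB.length = (qB.takeWhile p1).length :=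
    pvBisect_takeWhile p1 qB hmono1 hsort
  have hdrop : qB.drop (qB.takeWhile p1).length = qB.filter (fun s => !(p1 s)) := by
    rw [pv_drop_takeWhile_length]
    exact pv_dropWhile_eq_filter p1 qB hmono1 hsort
  have hfc : qB.filter (fun s => !(p1 s)) = qB.filter (fun s => decide (x - s < st)) := by
    apply List.filter_congr
    intro a _
    simp only [hp1]
    by_cases h : x - a < st
    · have h1 : ¬ (x - a ≥ st) := by omega
      simp [h, h1]
    · have h1 : x - a ≥ st := by omega
      simp [h, h1]
  set q1 := qB.drop (pvBisect p1 qB 0 qB.length) with hq1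
  have hq1f : q1 = qB.filter (fun s => decide (x - s < st)) := by
    rw [hq1, hk, hdrop, hfc]
  have hsort1 : q1.Pairwise (· ≤ ·) := by rw [hq1f]; exact hsort.filter _
  have hperm1 : q1.Perm (qA.filter (fun s => decide (x - s < st))) := by
    rw [hq1f]; exact hperm.filter _
  -- the second search splits q1 into takeWhile/dropWhile and splices x in between
  have hj : pvBisect p2 q1 0 q1.length = (q1.takeWhile p2).length :=
    pvBisect_takeWhile p2 q1 hmono2 hsort1
  have htake : q1.take (q1.takeWhile p2).length = q1.takeWhile p2 :=
    pv_take_takeWhile_length p2 q1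
  have hdrop2 : q1.drop (q1.takeWhile p2).length = q1.dropWhile p2 :=
    pv_drop_takeWhile_length p2 q1
  have hqfin : (pvStepB st (qB, 0) x).1
      = q1.takeWhile p2 ++ x :: q1.dropWhile p2 := by
    show (let k := pvBisect (fun s => decide (x - s ≥ st)) qB 0 qB.length
          let q1' := qB.drop k
          let j := pvBisect (fun s => decide (s ≤ x)) q1' 0 q1'.length
          q1'.take j ++ [x] ++ q1'.drop j) = _
    simp only [← hp1, ← hp2, ← hq1, hj, htake, hdrop2]
    simp
  constructor
  · rw [hqfin]
    refine List.perm_middle.trans ?_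
    rw [List.takeWhile_append_dropWhile]
    exact (hperm1.cons x).trans (List.perm_append_singleton x _).symm
  · rw [hqfin]
    apply List.pairwise_append.mpr
    refine ⟨List.Pairwise.sublist (List.takeWhile_sublist p2) hsort1, ?_, ?_⟩
    · apply List.pairwise_cons.mpr
      refine ⟨?_, List.Pairwise.sublist (List.dropWhile_sublist p2) hsort1⟩
      intro b hb
      have : b ∈ q1.filter (fun s => !(p2 s)) := by
        rw [← pv_dropWhile_eq_filter p2 q1 hmono2 hsort1]; exact hb
      have := List.of_mem_filter this
      simp only [hp2, Bool.not_eq_true', decide_eq_false_iff_not] at this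
      omega
    · intro a ha b hb
      have hax : a ≤ x := by
        have := List.mem_takeWhile_imp ha
        simpa [hp2] using this
      rcases List.mem_cons.mp hb with rfl | hb
      · exact hax
      · have : b ∈ q1.filter (fun s => !(p2 s)) := by
          rw [← pv_dropWhile_eq_filter p2 q1 hmono2 hsort1]; exact hb
        have := List.of_mem_filter this
        simp only [hp2, Bool.not_eq_true', decide_eq_false_iff_not] at this
        omega

-- loop invariant: B's queue is a sorted permutation of A's queue; maxima coincide
lemma foldl_eq (st : Int) : ∀ (l qA qB : List Int) (m : Int),
    qB.Perm qA → qB.Pairwise (· ≤ ·) →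
    (l.foldl (pvStepA st) (qA, m)).2 = (l.foldl (pvStepB st) (qB, m)).2 := by
  intro l
  induction l with
  | nil => intro qA qB m _ _; rfl
  | cons x t ih =>
    intro qA qB m hperm hsort
    obtain ⟨hp, hs⟩ := pvStepB_q st x qA qB hperm hsort
    have hlen : ((pvStepB st (qB, 0) x).1).length
        = ((qA.filter (fun s => decide (x - s < st))) ++ [x]).length := hp.length_eq
    simp only [List.foldl_cons]
    have hstepA : pvStepA st (qA, m) x
        = ((qA.filter (fun s => decide (x - s < st))) ++ [x],
           if (((qA.filter (fun s => decide (x - s < st))) ++ [x]).length : Int) > m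
           then (((qA.filter (fun s => decide (x - s < st))) ++ [x]).length : Int) else m) := by
      simp [pvStepA]
    have hstepB : pvStepB st (qB, m) x
        = ((pvStepB st (qB, 0) x).1,
           if (((pvStepB st (qB, 0) x).1).length : Int) > m
           then (((pvStepB st (qB, 0) x).1).length : Int) else m) := rfl
    rw [hstepA, hstepB, hlen]
    exact ih _ _ _ hp hs

-- ===== VERDICT (by name: the statement is the Claim_ definition above) =====
theorem calculate_min_num_of_services_spec : Claim_equal_calculate_min_num_of_services := by
  intro st arrivals _
  show calculate_min_num_of_services st arrivals = calculate_min_num_of_services_alt st arrivals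
  unfold calculate_min_num_of_services calculate_min_num_of_services_alt
  exact foldl_eq st arrivals [] [] 0 (List.Perm.refl _) (by simp)
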